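-- pv_equiv track=rewrite | github.com/IntrntSrfr/aoc | 2023/1/main.py | replace_keys_in_string
-- ===== SOURCE A (Python) =====
-- def replace_keys_in_string(s, replacements):
--     new_string = ""
--     i = 0
--     while i < len(s):
--         replaced = False
--         for key, value in replacements.items():
--             if s[i:i+len(key)] == key:
--                 new_string += value
--                 i += len(key)
--                 replaced = True
--                 break
--         if not replaced:
--             new_string += s[i]
--             i += 1
--     return new_string
-- ===== SOURCE B (Python) =====
-- def replace_keys_in_string(s, replacements):
--     # Index the replacement keys by their first character once, so each position
--     # only tries the keys that can possibly match there (dict priority preserved: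
--     # keys sharing a first character stay in insertion order, and keys with a
--     # different first character can never match at that position).
--     pairs = [(key[0], (key, value)) for key, value in replacements.items() if key]
--     buckets = {}
--     for c, kv in pairs:
--         buckets.setdefault(c, []).append(kv)
--     out = ""
--     i = 0
--     n = len(s)
--     while i < n:
--         c = s[i]
--         for key, value in buckets.get(c, ()):
--             if s.startswith(key, i):
--                 out += value
--                 i += len(key)
--                 break
--         else:
--             out += c
--             i += 1
--     return out
-- ===== Notes on version B (the rewrite author's own statement) =====
-- stated objective: faster
-- what changed: B builds a first-character index of the replacement keys once, so at each string position only the keys that can possibly match (same first character, dict order preserved) are tried, instead of A's scan over every key with a fresh slice comparison.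
-- outside the precondition, e.g. on replace_keys_in_string('aa', {'a': 'x', '': 'y'}): A returns 'xx', B returns 'xx'
import Mathlib
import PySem

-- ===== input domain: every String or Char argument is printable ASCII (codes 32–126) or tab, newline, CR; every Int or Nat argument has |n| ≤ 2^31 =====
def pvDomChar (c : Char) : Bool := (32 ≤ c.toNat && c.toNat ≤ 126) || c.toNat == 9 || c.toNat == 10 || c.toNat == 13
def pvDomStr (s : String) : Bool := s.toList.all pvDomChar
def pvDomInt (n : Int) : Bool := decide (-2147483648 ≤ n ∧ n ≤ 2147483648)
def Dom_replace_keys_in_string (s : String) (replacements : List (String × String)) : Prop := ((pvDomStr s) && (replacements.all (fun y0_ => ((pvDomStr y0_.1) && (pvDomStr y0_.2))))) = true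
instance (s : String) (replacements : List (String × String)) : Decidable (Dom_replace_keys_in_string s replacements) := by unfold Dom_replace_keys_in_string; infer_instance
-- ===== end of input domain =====

-- B indexes the replacement keys by first character once, so each position only tries the
-- keys that can match there (same result; objective: faster inner scan).
-- A's parameter 'replacements' is a Python dict; both ports model it via PySem.Dict.ofList.


-- ===== PORT A =====
-- inner 'for key, value in replacements.items(): if s[i:i+len(key)] == key: … break'
def pvMatchA (cs : List Char) (i : Nat) (kv : String × String) : Bool :=
  PySem.List.slice cs (some (i : Int)) (some ((i : Int) + (kv.1.toList.length : Int))) == kv.1.toList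

-- the while loop; fuel = len(s) bounds the iterations (each one advances i by ≥ 1 under Pre_)
def pvGoA (cs : List Char) (items : List (String × String)) : Nat → Nat → List Char → List Char
  | 0, _, acc => acc
  | fuel + 1, i, acc =>
    if i < cs.length then
      match items.find? (pvMatchA cs i) with
      | some kv => pvGoA cs items fuel (i + kv.1.toList.length) (acc ++ kv.2.toList)
      | none =>
        match cs[i]? with               -- s[i], in range since i < len(s)
        | some ch => pvGoA cs items fuel (i + 1) (acc ++ [ch])
        | none => acc
    else acc

def replace_keys_in_string (s : String) (replacements : List (String × String)) : String :=
  String.ofList (pvGoA s.toList (PySem.Dict.ofList replacements).items s.toList.length 0 [])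

-- ===== PORT B =====
-- pairs = [(key[0], (key, value)) for key, value in replacements.items() if key]
-- buckets = {}; for c, kv in pairs: buckets.setdefault(c, []).append(kv)
def pvBuckets (items : List (String × String)) : PySem.Dict Char (List (String × String)) :=
  (items.filterMap (fun kv =>
      match kv.1.toList with
      | [] => none
      | c :: _ => some (c, kv))).foldl
    (fun d p => d.modify p.1 [] (fun l => l ++ [p.2])) PySem.Dict.empty

-- s.startswith(key, i) = key is a prefix of s[i:] (exact for 0 ≤ i)
def pvMatchB (cs : List Char) (i : Nat) (kv : String × String) : Bool :=
  PySem.Chars.startswith (cs.drop i) kv.1.toList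

def pvGoB (cs : List Char) (buckets : PySem.Dict Char (List (String × String))) :
    Nat → Nat → List Char → List Char
  | 0, _, acc => acc
  | fuel + 1, i, acc =>
    if i < cs.length then
      match cs[i]? with                 -- c = s[i], in range since i < n
      | none => acc
      | some c =>
        match (buckets.getD c []).find? (pvMatchB cs i) with
        | some kv => pvGoB cs buckets fuel (i + kv.1.toList.length) (acc ++ kv.2.toList)
        | none => pvGoB cs buckets fuel (i + 1) (acc ++ [c])
    else acc

def replace_keys_in_string_alt (s : String) (replacements : List (String × String)) : String :=
  String.ofList (pvGoB s.toList (pvBuckets (PySem.Dict.ofList replacements).items) s.toList.length 0 [])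

-- ===== PRECONDITION & SPEC =====
-- Pre_ excludes nonempty strings paired with an empty-string key: there A's while loop fails to
-- advance and diverges whenever the empty key is the first match at some position (on the
-- excluded inputs where the empty key never wins, A still returns and B returns the same value).
def Pre_replace_keys_in_string (s : String) (replacements : List (String × String)) : Prop :=
  s = "" ∨ ∀ kv ∈ replacements, kv.1 ≠ ""
instance (s : String) (replacements : List (String × String)) : Decidable (Pre_replace_keys_in_string s replacements) := by unfold Pre_replace_keys_in_string; infer_instance

def pvWitness_replace_keys_in_string : String × (List (String × String)) :=
  ("one2two", [("one", "1"), ("two", "2"), ("o", "0")])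

def Spec_replace_keys_in_string (s : String) (replacements : List (String × String)) (out : String) : Prop := out = replace_keys_in_string_alt s replacements
instance (s : String) (replacements : List (String × String)) (out : String) : Decidable (Spec_replace_keys_in_string s replacements out) := by unfold Spec_replace_keys_in_string; infer_instance

-- ===== CLAIM (what is proved, stated in full; the proofs are below) =====
def Claim_equal_replace_keys_in_string : Prop := ∀ (s : String) (replacements : List (String × String)), Dom_replace_keys_in_string s replacements → Pre_replace_keys_in_string s replacements → Spec_replace_keys_in_string s replacements (replace_keys_in_string s replacements)

-- ===== LEMMAS AND PROOFS =====

-- a find? over the whole list equals a find? over the hm-filtered list when pA = hm && pB pointwise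
theorem pv_find?_filter {α : Type} (l : List α) (pA pB hm : α → Bool)
    (h : ∀ x ∈ l, pA x = (hm x && pB x)) : l.find? pA = (l.filter hm).find? pB := by
  induction l with
  | nil => rfl
  | cons x xs ih =>
    have hx := h x (by simp)
    have ih' := ih (fun y hy => h y (by simp [hy]))
    cases hhm : hm x with
    | false => simp [hhm, hx, ih']
    | true =>
      cases hpb : pB x with
      | false => simp [hhm, hpb, hx, ih']
      | true => simp [hhm, hpb, hx]

-- bucket c = the items whose key starts with c, in order
theorem pv_bucket (items : List (String × String)) (h : ∀ kv ∈ items, kv.1 ≠ "") (c : Char) :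
    (pvBuckets items).getD c [] =
      items.filter (fun kv => match kv.1.toList with | [] => false | d :: _ => d == c) := by
  unfold pvBuckets
  rw [PySem.Dict.getD_foldl_modify_append]
  simp only [PySem.Dict.getD_empty, List.nil_append]
  induction items with
  | nil => rfl
  | cons kv tl ih =>
    have hkv : kv.1 ≠ "" := h kv (by simp)
    have htl := ih (fun y hy => h y (by simp [hy]))
    obtain ⟨d, k', hk⟩ : ∃ d k', kv.1.toList = d :: k' := by
      cases hl : kv.1.toList with
      | nil => exact absurd (String.toList_eq_nil_iff.mp hl) hkv
      | cons a b => exact ⟨a, b, rfl⟩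
    by_cases hdc : d = c
    · simp [hk, hdc, htl]
    · simp [hk, hdc, htl]

-- all keys of dict(replacements) are nonempty when all keys of the pair list are
theorem pv_fold_keys (repl : List (String × String)) (d : PySem.Dict String String)
    (hd : ∀ kv ∈ d.items, kv.1 ≠ "") (h : ∀ kv ∈ repl, kv.1 ≠ "") :
    ∀ kv ∈ (repl.foldl (fun d p => d.insert p.1 p.2) d).items, kv.1 ≠ "" := by
  induction repl generalizing d with
  | nil => exact hd
  | cons p tl ih =>
    refine ih (d.insert p.1 p.2) ?_ (fun y hy => h y (by simp [hy]))
    intro kv hm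
    rcases (PySem.Dict.mem_items_insert d p.1 p.2 kv).1 hm with heq | ⟨hmem, _⟩
    · rw [heq]; exact h p (by simp)
    · exact hd kv hmem

-- at an in-range position, "the slice equals the key" = "key's head is s[i] AND key prefixes s[i:]"
theorem pv_match_eq (cs : List Char) (i : Nat) (c : Char) (hc : cs[i]? = some c)
    (kv : String × String) (hk : kv.1 ≠ "") :
    pvMatchA cs i kv =
      ((match kv.1.toList with | [] => false | d :: _ => d == c) && pvMatchB cs i kv) := by
  obtain ⟨d, k', hkl⟩ : ∃ d k', kv.1.toList = d :: k' := by
    cases hl : kv.1.toList with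
    | nil => exact absurd (String.toList_eq_nil_iff.mp hl) hk
    | cons a b => exact ⟨a, b, rfl⟩
  have hpre : ∀ {l : List Char}, l <+: cs.drop i → l = d :: k' → d = c := by
    intro l hp hl
    subst hl
    have h1 : (cs.drop i).head? = some d := by
      rcases hp with ⟨t, ht⟩
      rw [← ht]; rfl
    rw [List.head?_drop, hc] at h1
    exact (Option.some.inj h1).symm
  unfold pvMatchA pvMatchB
  rw [PySem.List.slice_natCast_add, hkl]
  rw [Bool.eq_iff_iff]
  simp only [beq_iff_eq, Bool.and_eq_true, PySem.Chars.startswith_iff]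
  constructor
  · intro htake
    have hp : d :: k' <+: cs.drop i := by
      rw [List.prefix_iff_eq_take]
      exact htake.symm
    exact ⟨by simp [hpre hp rfl], hp⟩
  · rintro ⟨-, hp⟩
    exact (List.prefix_iff_eq_take.1 hp).symm

-- A's inner scan over all items = B's scan over the bucket of s[i]
theorem pv_find_eq (cs : List Char) (items : List (String × String))
    (h : ∀ kv ∈ items, kv.1 ≠ "") (i : Nat) (c : Char) (hc : cs[i]? = some c) :
    items.find? (pvMatchA cs i) = ((pvBuckets items).getD c []).find? (pvMatchB cs i) := by
  rw [pv_bucket items h c]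
  exact pv_find?_filter items _ _ _ (fun kv hkv => pv_match_eq cs i c hc kv (h kv hkv))

-- the two loops agree step by step
theorem pv_go_eq (cs : List Char) (items : List (String × String))
    (h : ∀ kv ∈ items, kv.1 ≠ "") :
    ∀ fuel i acc, pvGoA cs items fuel i acc = pvGoB cs (pvBuckets items) fuel i acc := by
  intro fuel
  induction fuel with
  | zero => intro i acc; rfl
  | succ n ih =>
    intro i acc
    by_cases hi : i < cs.length
    · have hc : cs[i]? = some cs[i] := List.getElem?_eq_getElem hi
      rw [show pvGoA cs items (n + 1) i acc =
            (match items.find? (pvMatchA cs i) with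
             | some kv => pvGoA cs items n (i + kv.1.toList.length) (acc ++ kv.2.toList)
             | none => pvGoA cs items n (i + 1) (acc ++ [cs[i]])) from by
        rw [pvGoA]; simp [hi]]
      rw [show pvGoB cs (pvBuckets items) (n + 1) i acc =
            (match ((pvBuckets items).getD cs[i] []).find? (pvMatchB cs i) with
             | some kv => pvGoB cs (pvBuckets items) n (i + kv.1.toList.length) (acc ++ kv.2.toList)
             | none => pvGoB cs (pvBuckets items) n (i + 1) (acc ++ [cs[i]])) from by
        rw [pvGoB]; simp [hi]]
      rw [pv_find_eq cs items h i cs[i] hc]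
      cases hfind : ((pvBuckets items).getD cs[i] []).find? (pvMatchB cs i) with
      | some kv => exact ih _ _
      | none => exact ih _ _
    · rw [pvGoA, pvGoB]; simp [hi]

-- ===== VERDICT (by name: the statement is the Claim_ definition above) =====
theorem replace_keys_in_string_spec : Claim_equal_replace_keys_in_string := by
  intro s replacements _hdom hpre
  unfold Spec_replace_keys_in_string replace_keys_in_string replace_keys_in_string_alt
  rcases hpre with hs | hkeys
  · subst hs; rfl
  · exact congrArg String.ofList
      (pv_go_eq s.toList _ (pv_fold_keys replacements PySem.Dict.empty (by simp [PySem.Dict.empty]) hkeys)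
        s.toList.length 0 [])
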